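-- pv_equiv track=rewrite | github.com/diarmuidmckenna/coloured_mapf | makespan_estimator.py | transform_to_classic_MAPF
-- ===== SOURCE A (Python) =====
-- def transform_to_classic_MAPF(starts, goals):
--     """
--     starts - dictionary where keys are team numbers and values and lists of tuples denoting starting (x,y) coordinates
--     goals - dictionary where keys are team numbers and values and lists of tuples denoting goal (x,y) coordinates
--     returns 2 lists: starts and goals and a dictionary which stores what indexes of the start and goals belong to each team
--     purpose is to not bias any team but to choose agents priority in a round robin way
--     ASSUMPTION - TEAMS MUST ALL HAVE SAME NUMBER OF AGENTS FOR THIS TO BE CORRECT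
--     """
--     new_goals = []
--     new_starts = []
--     indexes_of_teams = dict()
--     index = 0
--     for agent in range(len(starts[1])):
--         for key in starts.keys():
--             new_starts.append(starts[key][agent])
--             new_goals.append(goals[key][agent])
--             try:
--                 indexes_of_teams[key].append(index)
--             except:
--                 indexes_of_teams[key] = [index]
--             index +=1
--     return indexes_of_teams, new_starts, new_goals
-- ===== SOURCE B (Python) =====
-- def transform_to_classic_MAPF(starts, goals):
--     keys = list(starts.keys())
--     n = len(starts[1])
--     new_starts = [starts[k][a] for a in range(n) for k in keys]
--     new_goals = [goals[k][a] for a in range(n) for k in keys]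
--     T = len(keys)
--     total = n * T
--     if total == 0:
--         return {}, new_starts, new_goals
--     indexes_of_teams = {k: list(range(p, total, T)) for p, k in enumerate(keys)}
--     return indexes_of_teams, new_starts, new_goals
-- ===== Notes on version B (the rewrite author's own statement) =====
-- stated objective: alternative
-- what changed: B replaces A's single nested loop with a running index counter and try/except dict mutation by comprehension-style flat interleaves plus closed-form stride ranges (range(p, n*T, T)) for each team's index list, guarded so zero agents yields an empty dict like A.
import Mathlib
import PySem

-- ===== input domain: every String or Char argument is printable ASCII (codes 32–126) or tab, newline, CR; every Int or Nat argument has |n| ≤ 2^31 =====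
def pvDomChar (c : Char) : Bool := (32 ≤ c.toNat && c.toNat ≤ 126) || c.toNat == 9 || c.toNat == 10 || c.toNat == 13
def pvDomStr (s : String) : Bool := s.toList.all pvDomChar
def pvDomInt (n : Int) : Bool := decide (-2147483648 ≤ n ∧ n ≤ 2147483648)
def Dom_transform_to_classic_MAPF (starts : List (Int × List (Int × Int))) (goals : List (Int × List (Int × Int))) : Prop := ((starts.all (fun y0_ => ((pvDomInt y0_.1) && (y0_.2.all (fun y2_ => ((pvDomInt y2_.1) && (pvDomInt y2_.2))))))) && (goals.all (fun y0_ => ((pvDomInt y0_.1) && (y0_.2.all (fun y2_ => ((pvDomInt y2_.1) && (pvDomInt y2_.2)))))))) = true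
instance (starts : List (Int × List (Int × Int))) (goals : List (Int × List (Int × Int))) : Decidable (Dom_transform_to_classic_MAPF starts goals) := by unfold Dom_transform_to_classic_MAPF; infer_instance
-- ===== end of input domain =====

-- B replaces A's nested append loop with a running counter by comprehension-style flat maps plus
-- closed-form stride ranges for the per-team index lists (same values, different decomposition).

-- ===== PORT A =====
-- hand-port of A's try/except pattern 'indexes_of_teams[key].append(index) / = [index]' on a dict:
-- the first matching key's list is extended in place, a missing key is appended at the end —
-- exact Python dict-mutation semantics for this access pattern.
def updIdxA (l : List (Int × List Int)) (k i : Int) : List (Int × List Int) :=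
  match l with
  | [] => [(k, [i])]
  | (k', v) :: t => if k' == k then (k', v ++ [i]) :: t else (k', v) :: updIdxA t k i

-- '.getD (0, 0)' only papers over IndexError/KeyError cases, which lie outside Pre_.
def transform_to_classic_MAPF (starts : List (Int × List (Int × Int))) (goals : List (Int × List (Int × Int))) : (List (Int × List Int)) × (List (Int × Int)) × (List (Int × Int)) :=
  let dS := PySem.Dict.ofList starts
  let dG := PySem.Dict.ofList goals
  let st := (PySem.List.pyRange 0 ((dS.getD 1 []).length : Int) 1).foldl
    (fun st agent =>
      dS.keys.foldl
        (fun (st : List (Int × List Int) × List (Int × Int) × List (Int × Int) × Int) key =>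
          (updIdxA st.1 key st.2.2.2,
           st.2.1 ++ [(PySem.List.pyGet? (dS.getD key []) agent).getD (0, 0)],
           st.2.2.1 ++ [(PySem.List.pyGet? (dG.getD key []) agent).getD (0, 0)],
           st.2.2.2 + 1)) st)
    (([], [], [], 0) : List (Int × List Int) × List (Int × Int) × List (Int × Int) × Int)
  (st.1, st.2.1, st.2.2.1)

-- ===== PORT B =====
def transform_to_classic_MAPF_alt (starts : List (Int × List (Int × Int))) (goals : List (Int × List (Int × Int))) : (List (Int × List Int)) × (List (Int × Int)) × (List (Int × Int)) :=
  let dS := PySem.Dict.ofList starts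
  let dG := PySem.Dict.ofList goals
  let keys := dS.keys
  let n : Int := ((dS.getD 1 []).length : Int)
  let new_starts := (PySem.List.pyRange 0 n 1).flatMap
      (fun a => keys.map (fun k => (PySem.List.pyGet? (dS.getD k []) a).getD (0, 0)))
  let new_goals := (PySem.List.pyRange 0 n 1).flatMap
      (fun a => keys.map (fun k => (PySem.List.pyGet? (dG.getD k []) a).getD (0, 0)))
  let T : Int := (keys.length : Int)
  let total := n * T
  if total == 0 then ([], new_starts, new_goals)
  else ((PySem.List.enumerate keys).map (fun pk => (pk.2, PySem.List.pyRange pk.1 total T)),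
        new_starts, new_goals)

-- ===== PRECONDITION & SPEC =====
-- Pre_ = exactly the inputs where Python A returns: team 1 must exist (else KeyError on starts[1]),
-- and unless it has no agents, every team must exist in goals and have at least as many agents
-- (else KeyError/IndexError inside the loop).
def Pre_transform_to_classic_MAPF (starts : List (Int × List (Int × Int))) (goals : List (Int × List (Int × Int))) : Prop :=
  let dS := PySem.Dict.ofList starts
  let dG := PySem.Dict.ofList goals
  let n := (dS.getD 1 []).length
  dS.contains 1 = true ∧
  (n = 0 ∨ ∀ k ∈ dS.keys, n ≤ (dS.getD k []).length ∧ dG.contains k = true ∧ n ≤ (dG.getD k []).length)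
instance (starts : List (Int × List (Int × Int))) (goals : List (Int × List (Int × Int))) : Decidable (Pre_transform_to_classic_MAPF starts goals) := by unfold Pre_transform_to_classic_MAPF; infer_instance

def pvWitness_transform_to_classic_MAPF : (List (Int × List (Int × Int))) × (List (Int × List (Int × Int))) :=
  ([(1, [(0, 0), (2, 3)]), (2, [(4, 4), (5, 5)])], [(1, [(1, 1), (3, 2)]), (2, [(6, 6), (7, 7)])])

def Spec_transform_to_classic_MAPF (starts : List (Int × List (Int × Int))) (goals : List (Int × List (Int × Int))) (out : (List (Int × List Int)) × (List (Int × Int)) × (List (Int × Int))) : Prop := out = transform_to_classic_MAPF_alt starts goals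
instance (starts : List (Int × List (Int × Int))) (goals : List (Int × List (Int × Int))) (out : (List (Int × List Int)) × (List (Int × Int)) × (List (Int × Int))) : Decidable (Spec_transform_to_classic_MAPF starts goals out) := by unfold Spec_transform_to_classic_MAPF; infer_instance

-- ===== CLAIM (what is proved, stated in full; the proofs are below) =====
def Claim_equal_transform_to_classic_MAPF : Prop := ∀ (starts : List (Int × List (Int × Int))) (goals : List (Int × List (Int × Int))), Dom_transform_to_classic_MAPF starts goals → Pre_transform_to_classic_MAPF starts goals → Spec_transform_to_classic_MAPF starts goals (transform_to_classic_MAPF starts goals)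

-- ===== LEMMAS AND PROOFS =====

-- value fetched for team k at agent a (shared shape of both ports' element computation)
def pvSv (d : PySem.Dict Int (List (Int × Int))) (a k : Int) : Int × Int :=
  (PySem.List.pyGet? (d.getD k []) a).getD (0, 0)

-- A's inner loop over the key list
def pvInner (dS dG : PySem.Dict Int (List (Int × Int))) (a : Int) (L : List Int)
    (st : List (Int × List Int) × List (Int × Int) × List (Int × Int) × Int) :
    List (Int × List Int) × List (Int × Int) × List (Int × Int) × Int :=
  L.foldl
    (fun st key =>
      (updIdxA st.1 key st.2.2.2,
       st.2.1 ++ [pvSv dS a key],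
       st.2.2.1 ++ [pvSv dG a key],
       st.2.2.2 + 1)) st

-- the index-dict part of one inner round
def pvIdxUpd : List Int → List (Int × List Int) → Int → List (Int × List Int)
  | [], idx, _ => idx
  | k :: t, idx, i => pvIdxUpd t (updIdxA idx k i) (i + 1)

-- round-robin association list: key at offset p (counting from s) carries g p
def pvRR : List Int → Int → (Int → List Int) → List (Int × List Int)
  | [], _, _ => []
  | k :: t, s, g => (k, g s) :: pvRR t (s + 1) g

-- A's outer loop, parameterised by the number of rounds
def pvOuter (dS dG : PySem.Dict Int (List (Int × Int))) (m : Nat) :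
    List (Int × List Int) × List (Int × Int) × List (Int × Int) × Int :=
  (PySem.List.pyRange 0 (m : Int) 1).foldl (fun st a => pvInner dS dG a dS.keys st) ([], [], [], 0)

theorem pvRR_congr (L : List Int) (s : Int) (g g' : Int → List Int)
    (h : ∀ p, s ≤ p → p < s + L.length → g p = g' p) : pvRR L s g = pvRR L s g' := by
  induction L generalizing s with
  | nil => rfl
  | cons k t ih =>
    simp only [pvRR]
    rw [h s le_rfl (by simp only [List.length_cons]; push_cast; omega),
        ih (s + 1) (fun p h1 h2 => h p (by omega)
          (by simp only [List.length_cons] at h2 ⊢; push_cast at h2 ⊢; omega))]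

theorem pvEnum_rr (L : List Int) (s : Int) (h : Int → List Int) :
    (PySem.List.enumerate L s).map (fun pk => (pk.2, h pk.1)) = pvRR L s h := by
  induction L generalizing s with
  | nil => simp [PySem.List.enumerate_nil, pvRR]
  | cons k t ih => simp [PySem.List.enumerate_cons, pvRR, ih]

theorem updIdxA_fresh (done : List (Int × List Int)) (k i : Int) (h : k ∉ done.map Prod.fst) :
    updIdxA done k i = done ++ [(k, [i])] := by
  induction done with
  | nil => rfl
  | cons p t ih =>
    simp only [List.map_cons, List.mem_cons] at h
    push Not at h
    simp [updIdxA, beq_iff_eq, Ne.symm h.1, ih h.2]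

theorem updIdxA_hit (done rest : List (Int × List Int)) (k i : Int) (v : List Int)
    (h : k ∉ done.map Prod.fst) :
    updIdxA (done ++ (k, v) :: rest) k i = done ++ (k, v ++ [i]) :: rest := by
  induction done with
  | nil => simp [updIdxA]
  | cons p t ih =>
    simp only [List.map_cons, List.mem_cons] at h
    push Not at h
    simp [updIdxA, beq_iff_eq, Ne.symm h.1, ih h.2]

theorem pvInner_spec (dS dG : PySem.Dict Int (List (Int × Int))) (a : Int) (L : List Int)
    (st : List (Int × List Int) × List (Int × Int) × List (Int × Int) × Int) :
    pvInner dS dG a L st =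
      (pvIdxUpd L st.1 st.2.2.2,
       st.2.1 ++ L.map (pvSv dS a),
       st.2.2.1 ++ L.map (pvSv dG a),
       st.2.2.2 + L.length) := by
  induction L generalizing st with
  | nil => simp [pvInner, pvIdxUpd]
  | cons k t ih =>
    simp only [pvInner, List.foldl_cons] at ih ⊢
    rw [ih]
    simp only [pvIdxUpd, List.map_cons, List.length_cons, List.append_assoc, List.cons_append,
      List.nil_append, Prod.mk.injEq]
    refine ⟨trivial, trivial, trivial, by push_cast; ring⟩

theorem pvIdxUpd_fresh (L : List Int) (done : List (Int × List Int)) (i : Int)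
    (hn : L.Nodup) (hd : ∀ k ∈ L, k ∉ done.map Prod.fst) :
    pvIdxUpd L done i = done ++ pvRR L i (fun p => [p]) := by
  induction L generalizing done i with
  | nil => simp [pvIdxUpd, pvRR]
  | cons k t ih =>
    simp only [pvIdxUpd, pvRR]
    rw [updIdxA_fresh done k i (hd k (by simp))]
    have hdis : ∀ k' ∈ t, k' ∉ List.map Prod.fst (done ++ [(k, [i])]) := by
      intro k' hk' hmem
      simp only [List.map_append, List.mem_append, List.map_cons, List.map_nil,
        List.mem_singleton] at hmem
      rcases hmem with h1 | h1
      · exact hd k' (List.mem_cons_of_mem _ hk') h1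
      · exact (List.nodup_cons.mp hn).1 (h1 ▸ hk')
    rw [ih (done ++ [(k, [i])]) (i + 1) (List.nodup_cons.mp hn).2 hdis]
    simp

theorem pvIdxUpd_round (L : List Int) (done : List (Int × List Int)) (i s : Int) (g : Int → List Int)
    (hn : L.Nodup) (hd : ∀ k ∈ L, k ∉ done.map Prod.fst) :
    pvIdxUpd L (done ++ pvRR L s g) i = done ++ pvRR L s (fun p => g p ++ [i + (p - s)]) := by
  induction L generalizing done i s g with
  | nil => simp [pvIdxUpd, pvRR]
  | cons k t ih =>
    simp only [pvIdxUpd, pvRR]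
    rw [updIdxA_hit done _ k i (g s) (hd k (by simp))]
    have hdis : ∀ k' ∈ t, k' ∉ List.map Prod.fst (done ++ [(k, g s ++ [i])]) := by
      intro k' hk' hmem
      simp only [List.map_append, List.mem_append, List.map_cons, List.map_nil,
        List.mem_singleton] at hmem
      rcases hmem with h1 | h1
      · exact hd k' (List.mem_cons_of_mem _ hk') h1
      · exact (List.nodup_cons.mp hn).1 (h1 ▸ hk')
    have hih := ih (done ++ [(k, g s ++ [i])]) (i + 1) (s + 1) g (List.nodup_cons.mp hn).2 hdis
    rw [show done ++ (k, g s ++ [i]) :: pvRR t (s + 1) g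
        = (done ++ [(k, g s ++ [i])]) ++ pvRR t (s + 1) g by simp]
    rw [hih]
    simp only [List.append_assoc, List.cons_append, List.nil_append]
    congr 2
    · rw [show i + (s - s) = i by omega]
    · exact pvRR_congr t (s + 1) _ _
        (fun p _ _ => by rw [show i + 1 + (p - (s + 1)) = i + (p - s) by omega])

theorem pvOuter_succ (dS dG : PySem.Dict Int (List (Int × Int))) (m : Nat) :
    pvOuter dS dG (m + 1) = pvInner dS dG (m : Int) dS.keys (pvOuter dS dG m) := by
  unfold pvOuter
  rw [show ((m + 1 : Nat) : Int) = (m : Int) + 1 by push_cast; ring,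
      PySem.List.pyRange_one_succ_right (Int.natCast_nonneg m), List.foldl_append]
  simp

theorem pvOuter_spec (dS dG : PySem.Dict Int (List (Int × Int))) (m : Nat)
    (hK : dS.keys.Nodup) :
    pvOuter dS dG m =
      ((if m = 0 then [] else pvRR dS.keys 0 (fun p => (List.range m).map (fun j : Nat => p + (dS.keys.length : Int) * (j : Int)))),
       (PySem.List.pyRange 0 (m : Int) 1).flatMap (fun a => dS.keys.map (pvSv dS a)),
       (PySem.List.pyRange 0 (m : Int) 1).flatMap (fun a => dS.keys.map (pvSv dG a)),
       (m : Int) * (dS.keys.length : Int)) := by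
  induction m with
  | zero =>
    rw [pvOuter, show ((0 : Nat) : Int) = 0 from rfl, PySem.List.pyRange_one_eq_nil le_rfl]
    simp
  | succ m ihm =>
    rw [pvOuter_succ, ihm, pvInner_spec]
    simp only [Prod.mk.injEq]
    refine ⟨?_, ?_, ?_, by push_cast; ring⟩
    · by_cases hm : m = 0
      · subst hm
        rw [if_pos rfl, if_neg (by omega)]
        rw [show ((0 : Nat) : Int) * (dS.keys.length : Int) = 0 by push_cast; ring]
        rw [pvIdxUpd_fresh dS.keys [] 0 hK (by simp)]
        rw [List.nil_append]
        exact pvRR_congr _ _ _ _ (fun p _ _ => by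
          rw [List.range_one, List.map_singleton]
          simp)
      · rw [if_neg hm, if_neg (by omega)]
        have := pvIdxUpd_round dS.keys []
          ((m : Int) * (dS.keys.length : Int)) 0
          (fun p => (List.range m).map (fun j : Nat => p + (dS.keys.length : Int) * (j : Int)))
          hK (by simp)
        rw [List.nil_append] at this
        rw [this]
        exact pvRR_congr _ _ _ _ (fun p _ _ => by
          simp only []
          rw [List.range_succ, List.map_append, List.map_singleton,
              show (m : Int) * (dS.keys.length : Int) + (p - 0)
                  = p + (dS.keys.length : Int) * (m : Int) from by ring])
    · rw [show ((m + 1 : Nat) : Int) = (m : Int) + 1 by push_cast; ring,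
          PySem.List.pyRange_one_succ_right (Int.natCast_nonneg m), List.flatMap_append]
      simp
    · rw [show ((m + 1 : Nat) : Int) = (m : Int) + 1 by push_cast; ring,
          PySem.List.pyRange_one_succ_right (Int.natCast_nonneg m), List.flatMap_append]
      simp

-- pyRange with stride T starting at p < T up to n*T lists exactly n elements p, p+T, …
theorem pvStride (p T : Int) (n : Nat) (hT : 0 < T) (hp0 : 0 ≤ p) (hp : p < T) (hn : 0 < n) :
    PySem.List.pyRange p ((n : Int) * T) T = (List.range n).map (fun j : Nat => p + T * (j : Int)) := by
  rw [PySem.List.pyRange_of_pos p ((n : Int) * T) hT]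
  have hlt : p < (n : Int) * T := by nlinarith [show (0:Int) < (n:Int) by exact_mod_cast hn]
  rw [if_pos hlt]
  have h1 : (n : Int) * T - p + T - 1 = (T - 1 - p) + (n : Int) * T := by ring
  rw [h1, Int.add_mul_ediv_right _ _ (ne_of_gt hT),
      Int.ediv_eq_zero_of_lt (by omega) (by omega), zero_add, Int.toNat_natCast]

-- ===== VERDICT (by name: the statement is the Claim_ definition above) =====
theorem transform_to_classic_MAPF_spec : Claim_equal_transform_to_classic_MAPF := by
  intro starts goals _ hpre
  unfold Pre_transform_to_classic_MAPF at hpre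
  obtain ⟨hc1, -⟩ := hpre
  have hK : (PySem.Dict.ofList starts).keys.Nodup := PySem.Dict.nodup_keys_ofList starts
  have hmem : (1 : Int) ∈ (PySem.Dict.ofList starts).keys :=
    (PySem.Dict.contains_iff_mem_keys _ _).mp hc1
  have hT : 0 < ((PySem.Dict.ofList starts).keys.length : Int) := by
    have := List.length_pos_of_mem hmem
    exact_mod_cast this
  unfold Spec_transform_to_classic_MAPF
  show transform_to_classic_MAPF starts goals = _
  have hA : transform_to_classic_MAPF starts goals =
      ((pvOuter (PySem.Dict.ofList starts) (PySem.Dict.ofList goals)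
          ((PySem.Dict.getD (PySem.Dict.ofList starts) 1 []).length)).1,
       (pvOuter (PySem.Dict.ofList starts) (PySem.Dict.ofList goals)
          ((PySem.Dict.getD (PySem.Dict.ofList starts) 1 []).length)).2.1,
       (pvOuter (PySem.Dict.ofList starts) (PySem.Dict.ofList goals)
          ((PySem.Dict.getD (PySem.Dict.ofList starts) 1 []).length)).2.2.1) := rfl
  rw [hA, pvOuter_spec _ _ _ hK]
  unfold transform_to_classic_MAPF_alt
  simp only []
  rcases Nat.eq_zero_or_pos ((PySem.Dict.getD (PySem.Dict.ofList starts) 1 []).length) with hn | hn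
  · rw [hn]
    rw [show ((0 : Nat) : Int) = 0 from rfl, PySem.List.pyRange_one_eq_nil le_rfl]
    simp
  · have hne : (((PySem.Dict.getD (PySem.Dict.ofList starts) 1 []).length : Int) *
        ((PySem.Dict.ofList starts).keys.length : Int) == 0) = false := by
      rw [beq_eq_false_iff_ne]
      have : (0 : Int) < ((PySem.Dict.getD (PySem.Dict.ofList starts) 1 []).length : Int) := by
        exact_mod_cast hn
      positivity
    rw [hne]
    simp only [Bool.false_eq_true, if_false, if_neg (Nat.pos_iff_ne_zero.mp hn)]
    refine congrArg₂ _ ?_ rfl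
    have he := pvEnum_rr (PySem.Dict.ofList starts).keys 0
      (fun p => PySem.List.pyRange p
        ((((PySem.Dict.ofList starts).getD 1 []).length : Int) *
          ((PySem.Dict.ofList starts).keys.length : Int))
        ((PySem.Dict.ofList starts).keys.length : Int))
    simp only [] at he
    rw [he]
    refine pvRR_congr _ _ _ _ (fun p h1 h2 => ?_)
    rw [zero_add] at h2
    exact (pvStride p _ _ hT h1 h2 hn).symm
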